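-- pv_equiv track=rewrite | github.com/emacsist/python-alfred-workflow | weibo/weibo-base62-decode.py | base62ToInt10String
-- ===== SOURCE A (Python) =====
-- BASE62 = "0123456789abcdefghijklmnopqrstuvwxyzABCDEFGHIJKLMNOPQRSTUVWXYZ"
--
-- def base62ToInt10String(base62String):
--     base10String = ""
--     c = 0
--     for i in range(len(base62String)):
--         n = len(base62String) - i - 1
--         s = base62String[i:i+1]
--
--         for k in range(len(BASE62)):
--             if s == BASE62[k]:
--                 c += int(k * pow(62, n))
--                 break
--         base10String = str(c)
--     return base10String
-- ===== SOURCE B (Python) =====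
-- BASE62 = "0123456789abcdefghijklmnopqrstuvwxyzABCDEFGHIJKLMNOPQRSTUVWXYZ"
-- _IDX = {ch: i for i, ch in enumerate(BASE62)}
--
-- def base62ToInt10String(base62String):
--     if not base62String:
--         return ""
--     c = 0
--     for ch in base62String:
--         c = c * 62 + _IDX.get(ch, 0)
--     return str(c)
-- ===== Notes on version B (the rewrite author's own statement) =====
-- stated objective: faster
-- what changed: Replaced the per-character linear scan of BASE62 plus pow(62, n) accumulation (and re-stringifying every iteration) with a single Horner-scheme pass using a precomputed char-to-index dictionary.
import Mathlib
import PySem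

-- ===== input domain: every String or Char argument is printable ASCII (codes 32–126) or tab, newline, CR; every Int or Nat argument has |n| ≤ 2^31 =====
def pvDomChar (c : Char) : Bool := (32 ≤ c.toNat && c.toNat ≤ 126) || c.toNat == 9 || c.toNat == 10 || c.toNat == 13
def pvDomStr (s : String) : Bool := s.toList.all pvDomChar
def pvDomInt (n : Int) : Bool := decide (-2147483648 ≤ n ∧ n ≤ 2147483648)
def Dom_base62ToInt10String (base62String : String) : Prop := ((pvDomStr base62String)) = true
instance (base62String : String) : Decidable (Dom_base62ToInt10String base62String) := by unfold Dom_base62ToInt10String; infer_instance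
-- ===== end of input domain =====

-- B replaces A's per-character linear scan of BASE62 and per-character pow(62, n) by a single
-- Horner pass with a precomputed char→index dictionary (objective: faster, constant-factor).

-- ===== PORT A =====
def pvBASE62 : List Char := "0123456789abcdefghijklmnopqrstuvwxyzABCDEFGHIJKLMNOPQRSTUVWXYZ".toList

-- inner loop 'for k in range(len(BASE62)): if s == BASE62[k]: c += int(k * pow(62, n)); break'
-- (pyGet? is always some here since k ranges over range(62) and len(BASE62) = 62)
def pvInnerA (s : List Char) (n : Nat) (c : Int) : List Int → Int
  | [] => c
  | k :: ks =>
    if s = (PySem.List.pyGet? pvBASE62 k).elim ([] : List Char) (fun ch => [ch]) then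
      c + k * (62 : Int) ^ n
    else pvInnerA s n c ks

def base62ToInt10String (base62String : String) : String :=
  let cs := base62String.toList
  let L : Int := cs.length
  let st := (PySem.List.pyRange 0 L 1).foldl
    (fun (st : String × Int) i =>
      let n : Nat := (L - i - 1).toNat          -- n = len - i - 1 (always ≥ 0 for i in range(len))
      let s := PySem.List.slice cs (some i) (some (i + 1))   -- s = base62String[i:i+1]
      let c := pvInnerA s n st.2 (PySem.List.pyRange 0 62 1)
      (PySem.Int.toStr c, c))                   -- base10String = str(c)
    ("", 0)
  st.1

-- ===== PORT B =====
-- _IDX = {ch: i for i, ch in enumerate(BASE62)}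
def pvIDX : PySem.Dict Char Int :=
  PySem.Dict.ofList ((PySem.List.enumerate pvBASE62 0).map (fun p => (p.2, p.1)))

def base62ToInt10String_alt (base62String : String) : String :=
  if base62String.toList = [] then ""        -- 'if not base62String: return ""'
  else PySem.Int.toStr
    (base62String.toList.foldl (fun c ch => c * 62 + PySem.Dict.getD pvIDX ch 0) 0)

-- ===== PRECONDITION & SPEC =====
def Spec_base62ToInt10String (base62String : String) (out : String) : Prop := out = base62ToInt10String_alt base62String
instance (base62String : String) (out : String) : Decidable (Spec_base62ToInt10String base62String out) := by unfold Spec_base62ToInt10String; infer_instance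

-- ===== CLAIM (what is proved, stated in full; the proofs are below) =====
def Claim_equal_base62ToInt10String : Prop := ∀ (base62String : String), Dom_base62ToInt10String base62String → Spec_base62ToInt10String base62String (base62ToInt10String base62String)

-- ===== LEMMAS AND PROOFS =====

-- the digit value B's dict lookup yields
def pvDigit (ch : Char) : Int := PySem.Dict.getD pvIDX ch 0

-- index of the first occurrence of ch (what A's inner scan finds)
def pvFirstIdx (ch : Char) : List Char → Option Nat
  | [] => none
  | c :: cs => if c = ch then some 0 else (pvFirstIdx ch cs).map (· + 1)

-- A's numeric step on one character position
def pvStep (cs : List Char) (c : Int) (i : Int) : Int :=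
  pvInnerA (PySem.List.slice cs (some i) (some (i + 1))) (((cs.length : Int) - i - 1).toNat) c
    (PySem.List.pyRange 0 62 1)

lemma pvFirstIdx_eq_none (ch : Char) (cs : List Char) (h : ch ∉ cs) : pvFirstIdx ch cs = none := by
  induction cs with
  | nil => rfl
  | cons c cs ih =>
    simp only [pvFirstIdx]
    rw [if_neg (by rintro rfl; exact h (by simp)), ih (fun hm => h (by simp [hm]))]
    rfl

set_option maxRecDepth 40000 in
lemma pvDigit_mem_bridge : pvBASE62.all (fun ch =>
    PySem.Dict.getD pvIDX ch 0 =
      (match pvFirstIdx ch pvBASE62 with | some t => (t : Int) | none => 0)) = true := by decide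

set_option maxRecDepth 40000 in
lemma pvDigit_eq (ch : Char) :
    pvDigit ch = match pvFirstIdx ch pvBASE62 with | some t => (t : Int) | none => 0 := by
  by_cases h : ch ∈ pvBASE62
  · have := List.all_eq_true.mp pvDigit_mem_bridge ch h
    simpa [pvDigit] using this
  · rw [pvFirstIdx_eq_none ch pvBASE62 h]
    show pvDigit ch = 0
    apply PySem.Dict.getD_of_not_contains
    rw [PySem.Dict.contains_eq_decide_mem_keys, decide_eq_false_iff_not]
    have hk : pvIDX.keys = pvBASE62 := by decide
    rw [hk]; exact h

lemma pvScan (ch : Char) (n : Nat) (c : Int) :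
    ∀ (m j : Nat), j + m = 62 →
    pvInnerA [ch] n c (PySem.List.pyRange (j : Int) 62 1) =
      c + (match pvFirstIdx ch (pvBASE62.drop j) with
           | some t => ((j + t : Nat) : Int) * (62 : Int) ^ n
           | none => 0) := by
  intro m
  induction m with
  | zero =>
    intro j hj
    have hj62 : j = 62 := by omega
    subst hj62
    rw [PySem.List.pyRange_one_eq_nil (by norm_num)]
    have hd : pvBASE62.drop 62 = [] := by decide
    simp [pvInnerA, hd, pvFirstIdx]
  | succ m ih =>
    intro j hj
    have hjl : j < 62 := by omega
    have hlen62 : pvBASE62.length = 62 := by decide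
    have hlen : j < pvBASE62.length := by omega
    rw [PySem.List.pyRange_one_cons (by exact_mod_cast hjl)]
    have hget : PySem.List.pyGet? pvBASE62 (j : Int) = some pvBASE62[j] := by
      simp [List.getElem?_eq_getElem hlen]
    simp only [pvInnerA, hget, Option.elim]
    rw [List.drop_eq_getElem_cons hlen]
    by_cases hc : pvBASE62[j] = ch
    · rw [if_pos (by simp [hc])]
      simp [pvFirstIdx, hc]
    · rw [if_neg (by simp; exact fun e => hc e.symm)]
      have h1 : ((j : Int) + 1) = ((j + 1 : Nat) : Int) := by push_cast; ring
      rw [h1, ih (j + 1) (by omega)]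
      simp only [pvFirstIdx, if_neg hc]
      cases hfi : pvFirstIdx ch (pvBASE62.drop (j + 1)) with
      | none => simp
      | some t =>
        simp only [Option.map_some]
        congr 2
        omega

lemma pvInnerA_eq (ch : Char) (n : Nat) (c : Int) :
    pvInnerA [ch] n c (PySem.List.pyRange 0 62 1) = c + pvDigit ch * (62 : Int) ^ n := by
  have h := pvScan ch n c 62 0 rfl
  norm_num at h
  rw [h, pvDigit_eq]
  cases pvFirstIdx ch pvBASE62 <;> simp

lemma pvSlice_one (cs : List Char) (j : Nat) (h : j < cs.length) :
    PySem.List.slice cs (some (j : Int)) (some ((j : Int) + 1)) = [cs[j]] := by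
  have h1 := PySem.List.slice_natCast_add (xs := cs) (j := j) (n := 1)
  rw [Nat.cast_one] at h1
  rw [h1, List.drop_eq_getElem_cons h]
  rfl

lemma pvLoop (cs : List Char) :
    ∀ (m j : Nat), j + m = cs.length → ∀ h : Int,
    (PySem.List.pyRange (j : Int) (cs.length : Int) 1).foldl (pvStep cs)
        (h * (62 : Int) ^ (cs.length - j)) =
      (cs.drop j).foldl (fun c ch => c * 62 + pvDigit ch) h := by
  intro m
  induction m with
  | zero =>
    intro j hj h
    have hj' : j = cs.length := by omega
    subst hj'
    rw [PySem.List.pyRange_one_eq_nil (le_refl _), List.drop_length]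
    simp
  | succ m ih =>
    intro j hj h
    have hjl : j < cs.length := by omega
    rw [PySem.List.pyRange_one_cons (by exact_mod_cast hjl), List.drop_eq_getElem_cons hjl]
    simp only [List.foldl_cons]
    have hstep : pvStep cs (h * (62 : Int) ^ (cs.length - j)) (j : Int) =
        (h * 62 + pvDigit cs[j]) * (62 : Int) ^ (cs.length - (j + 1)) := by
      unfold pvStep
      rw [pvSlice_one cs j hjl]
      have hn : (((cs.length : Int)) - (j : Int) - 1).toNat = cs.length - (j + 1) := by omega
      rw [hn, pvInnerA_eq]
      have he : cs.length - j = (cs.length - (j + 1)) + 1 := by omega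
      rw [he, pow_succ]
      ring
    rw [hstep]
    have h1 : ((j : Int) + 1) = ((j + 1 : Nat) : Int) := by push_cast; ring
    rw [h1, ih (j + 1) (by omega)]

lemma pvPairFold (cs : List Char) (ks : List Int) (s0 : String) (c0 : Int) :
    ks.foldl (fun (st : String × Int) i =>
        (PySem.Int.toStr (pvStep cs st.2 i), pvStep cs st.2 i)) (s0, c0) =
      (if ks = [] then s0 else PySem.Int.toStr (ks.foldl (pvStep cs) c0),
       ks.foldl (pvStep cs) c0) := by
  induction ks generalizing s0 c0 with
  | nil => simp
  | cons k ks ih =>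
    by_cases hks : ks = [] <;> simp [ih, hks]

lemma pvA_eq (s : String) : base62ToInt10String s =
    ((PySem.List.pyRange 0 ((s.toList.length : Int)) 1).foldl
      (fun (st : String × Int) i =>
        (PySem.Int.toStr (pvStep s.toList st.2 i), pvStep s.toList st.2 i)) ("", 0)).1 := rfl

-- ===== VERDICT (by name: the statement is the Claim_ definition above) =====
theorem base62ToInt10String_spec : Claim_equal_base62ToInt10String := by
  intro s _
  show base62ToInt10String s = base62ToInt10String_alt s
  rw [pvA_eq, pvPairFold]
  by_cases hcs : s.toList = []
  · rw [if_pos (by rw [hcs]; simp [PySem.List.pyRange_one_eq_nil])]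
    rw [base62ToInt10String_alt, if_pos hcs]
  · have hpos : 0 < s.toList.length := List.length_pos_iff.mpr hcs
    rw [if_neg (by
      rw [PySem.List.pyRange_one_cons (by exact_mod_cast hpos)]
      simp)]
    have h0 : (0 : Int) = ((0 : Nat) : Int) := rfl
    have hfold : (PySem.List.pyRange 0 ((s.toList.length : Int)) 1).foldl (pvStep s.toList) 0 =
        s.toList.foldl (fun c ch => c * 62 + pvDigit ch) 0 := by
      have := pvLoop s.toList s.toList.length 0 (by omega) 0
      simpa using this
    rw [hfold, base62ToInt10String_alt, if_neg hcs]
    rfl
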